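-- pv_equiv track=rewrite | github.com/salilab/SSEThread | PBMB_2019/dnapkcs_disordered_domain/modeling/modeling_enumerate_multi.py | enumerate_start_resis_3
-- ===== SOURCE A (Python) =====
-- def enumerate_start_resis_3(seq_bounds, se_lengths):
--     # Given the lengths of three SEs and the residue bounds, enumerate the potential start residues sets for each
--     # without overlaps.  The order of the SEs is not changed.
--
--     # TODO: allow for disjoint residue ranges
--     # TODO: Make general for N StructureElements
--
--     import itertools
--
--     seq_len = seq_bounds[1] - seq_bounds[0]
--
--     # Get all permutations
--     all_se_perms = list(itertools.permutations(se_lengths, len(se_lengths)))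
--
--     start_resis = []
--     for i in range(seq_bounds[0], seq_bounds[1] + 1 -se_lengths[0]-se_lengths[1]-se_lengths[2]-6):
--         for j in range(se_lengths[0]+i+2, seq_bounds[1]+1-se_lengths[1]-se_lengths[2]-4):
--             for k in range(se_lengths[1]+j+2, seq_bounds[1]+1-se_lengths[2]-2):
--                 start_resis.append((i,j,k))
--
--     return start_resis
-- ===== SOURCE B (Python) =====
-- def enumerate_start_resis_3(seq_bounds, se_lengths):
--     # Same triples in the same lexicographic order, generated as shifted
--     # non-decreasing triples via itertools instead of three nested loops.
--     import itertools
--     l0, l1, l2 = se_lengths[0], se_lengths[1], se_lengths[2]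
--     M = seq_bounds[1] - 6 - l0 - l1 - l2
--     return [(a, b + l0 + 2, c + l0 + l1 + 4)
--             for a, b, c in itertools.combinations_with_replacement(
--                 range(seq_bounds[0], M + 1), 3)]
-- ===== Notes on version B (the rewrite author's own statement) =====
-- stated objective: idiomatic
-- what changed: Replaced the three nested index loops by itertools.combinations_with_replacement over one range plus an affine shift of each triple component.
import Mathlib
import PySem

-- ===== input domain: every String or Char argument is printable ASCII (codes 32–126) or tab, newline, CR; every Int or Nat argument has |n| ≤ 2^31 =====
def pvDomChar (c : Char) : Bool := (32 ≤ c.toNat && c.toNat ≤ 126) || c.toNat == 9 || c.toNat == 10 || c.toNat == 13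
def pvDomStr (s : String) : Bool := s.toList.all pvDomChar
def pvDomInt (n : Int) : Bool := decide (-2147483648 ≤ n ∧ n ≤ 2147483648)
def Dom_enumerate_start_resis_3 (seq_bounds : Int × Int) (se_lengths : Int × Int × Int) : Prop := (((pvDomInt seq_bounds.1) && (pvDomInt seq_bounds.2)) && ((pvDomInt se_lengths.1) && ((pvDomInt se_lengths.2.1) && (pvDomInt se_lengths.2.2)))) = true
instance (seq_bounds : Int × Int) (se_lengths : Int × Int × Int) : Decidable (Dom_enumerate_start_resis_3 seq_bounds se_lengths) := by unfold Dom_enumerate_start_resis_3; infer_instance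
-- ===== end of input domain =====

-- B generates the same triples in the same order via combinations-with-replacement
-- of one range plus an affine shift, instead of three nested loops (idiomatic rewrite).

-- ===== PORT A =====
def enumerate_start_resis_3 (seq_bounds : Int × Int) (se_lengths : Int × Int × Int) : List (Int × Int × Int) :=
  let l0 := se_lengths.1
  let l1 := se_lengths.2.1
  let l2 := se_lengths.2.2
  let _seq_len := seq_bounds.2 - seq_bounds.1
  -- itertools.permutations(se_lengths, 3): computed and never used, as in A
  let _all_se_perms : List (Int × Int × Int) :=
    [(l0,l1,l2),(l0,l2,l1),(l1,l0,l2),(l1,l2,l0),(l2,l0,l1),(l2,l1,l0)]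
  (PySem.List.pyRange seq_bounds.1 (seq_bounds.2 + 1 - l0 - l1 - l2 - 6) 1).foldl
    (fun acc i =>
      (PySem.List.pyRange (l0 + i + 2) (seq_bounds.2 + 1 - l1 - l2 - 4) 1).foldl
        (fun acc j =>
          (PySem.List.pyRange (l1 + j + 2) (seq_bounds.2 + 1 - l2 - 2) 1).foldl
            (fun acc k => acc ++ [(i, j, k)]) acc) acc) []

-- ===== PORT B =====
-- itertools.combinations_with_replacement(xs, 2) / (xs, 3): for each suffix headed by a,
-- pair a with every combination-with-replacement from that same suffix (lexicographic order).
def pvCwr2 : List Int → List (Int × Int)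
  | [] => []
  | a :: rest => ((a :: rest).map (fun b => (a, b))) ++ pvCwr2 rest

def pvCwr3 : List Int → List (Int × Int × Int)
  | [] => []
  | a :: rest => ((pvCwr2 (a :: rest)).map (fun bc => (a, bc.1, bc.2))) ++ pvCwr3 rest

def enumerate_start_resis_3_alt (seq_bounds : Int × Int) (se_lengths : Int × Int × Int) : List (Int × Int × Int) :=
  let l0 := se_lengths.1
  let l1 := se_lengths.2.1
  let l2 := se_lengths.2.2
  let M := seq_bounds.2 - 6 - l0 - l1 - l2
  (pvCwr3 (PySem.List.pyRange seq_bounds.1 (M + 1) 1)).map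
    (fun abc => (abc.1, abc.2.1 + l0 + 2, abc.2.2 + l0 + l1 + 4))

-- ===== PRECONDITION & SPEC =====
def Spec_enumerate_start_resis_3 (seq_bounds : Int × Int) (se_lengths : Int × Int × Int) (out : List (Int × Int × Int)) : Prop := out = enumerate_start_resis_3_alt seq_bounds se_lengths
instance (seq_bounds : Int × Int) (se_lengths : Int × Int × Int) (out : List (Int × Int × Int)) : Decidable (Spec_enumerate_start_resis_3 seq_bounds se_lengths out) := by unfold Spec_enumerate_start_resis_3; infer_instance

-- ===== CLAIM (what is proved, stated in full; the proofs are below) =====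
def Claim_equal_enumerate_start_resis_3 : Prop := ∀ (seq_bounds : Int × Int) (se_lengths : Int × Int × Int), Dom_enumerate_start_resis_3 seq_bounds se_lengths → Spec_enumerate_start_resis_3 seq_bounds se_lengths (enumerate_start_resis_3 seq_bounds se_lengths)

-- ===== LEMMAS AND PROOFS =====

-- range shift: pyRange (a+d) (b+d) 1 = (pyRange a b 1).map (· + d)
theorem pv_pyRange_shift (a b d : Int) :
    PySem.List.pyRange (a + d) (b + d) 1 = (PySem.List.pyRange a b 1).map (· + d) := by
  rw [PySem.List.pyRange_one, PySem.List.pyRange_one]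
  have h : b + d - (a + d) = b - a := by ring
  rw [h, List.map_map]
  apply List.map_congr_left
  intro k _
  simp only [Function.comp_apply]
  ring

-- cwr2 over a range is the nested flatMap/map of A's two inner loops (unshifted)
theorem pv_cwr2_range (N : Int) : ∀ (n : Nat) (a : Int), (N - a).toNat = n →
    pvCwr2 (PySem.List.pyRange a N 1) =
      (PySem.List.pyRange a N 1).flatMap
        (fun b => (PySem.List.pyRange b N 1).map (fun c => (b, c))) := by
  intro n
  induction n with
  | zero =>
    intro a h
    rw [PySem.List.pyRange_one_eq_nil (by omega)]
    rfl
  | succ m ih =>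
    intro a h
    have hc : PySem.List.pyRange a N 1 = a :: PySem.List.pyRange (a+1) N 1 :=
      PySem.List.pyRange_one_cons (by omega)
    rw [hc]
    simp only [pvCwr2, List.flatMap_cons]
    rw [ih (a+1) (by omega), ← hc]

theorem pv_flatMap_singleton {α β : Type} (l : List α) (g : α → β) :
    l.flatMap (fun x => [g x]) = l.map g := by
  induction l with
  | nil => rfl
  | cons x xs ih => simp [ih]

-- cwr3 over a range is A's three nested loops (unshifted)
theorem pv_cwr3_range (N : Int) : ∀ (n : Nat) (a : Int), (N - a).toNat = n →
    pvCwr3 (PySem.List.pyRange a N 1) =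
      (PySem.List.pyRange a N 1).flatMap
        (fun i => (PySem.List.pyRange i N 1).flatMap
          (fun b => (PySem.List.pyRange b N 1).map (fun c => (i, b, c)))) := by
  intro n
  induction n with
  | zero =>
    intro a h
    rw [PySem.List.pyRange_one_eq_nil (by omega)]
    rfl
  | succ m ih =>
    intro a h
    have hc : PySem.List.pyRange a N 1 = a :: PySem.List.pyRange (a+1) N 1 :=
      PySem.List.pyRange_one_cons (by omega)
    rw [hc]
    simp only [pvCwr3, List.flatMap_cons]
    rw [ih (a+1) (by omega), ← hc, pv_cwr2_range N (N - a).toNat a rfl]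
    simp only [List.map_flatMap, List.map_map]
    rfl

-- ===== VERDICT (by name: the statement is the Claim_ definition above) =====
theorem enumerate_start_resis_3_spec : Claim_equal_enumerate_start_resis_3 := by
  intro sb sl _
  unfold Spec_enumerate_start_resis_3
  unfold enumerate_start_resis_3 enumerate_start_resis_3_alt
  obtain ⟨s0, S⟩ := sb
  obtain ⟨l0, l1, l2⟩ := sl
  simp only
  rw [pv_cwr3_range (S - 6 - l0 - l1 - l2 + 1) (S - 6 - l0 - l1 - l2 + 1 - s0).toNat s0 rfl]
  simp only [PySem.List.foldl_append_eq_flatMap,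
    List.nil_append, List.map_flatMap, List.map_map]
  have houter : S + 1 - l0 - l1 - l2 - 6 = S - 6 - l0 - l1 - l2 + 1 := by ring
  rw [houter]
  congr 1
  funext i
  have hj : PySem.List.pyRange (l0 + i + 2) (S + 1 - l1 - l2 - 4) 1
      = (PySem.List.pyRange i (S - 6 - l0 - l1 - l2 + 1) 1).map (· + (l0 + 2)) := by
    rw [← pv_pyRange_shift]
    congr 1 <;> ring
  rw [hj, List.flatMap_map]
  congr 1
  funext b
  have hk : PySem.List.pyRange (l1 + (b + (l0 + 2)) + 2) (S + 1 - l2 - 2) 1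
      = (PySem.List.pyRange b (S - 6 - l0 - l1 - l2 + 1) 1).map (· + (l0 + l1 + 4)) := by
    rw [← pv_pyRange_shift]
    congr 1 <;> ring
  rw [hk, List.flatMap_map]
  simp only [Function.comp_def]
  rw [pv_flatMap_singleton]
  apply List.map_congr_left
  intro c _
  simp only [Prod.mk.injEq]
  and_intros <;> first | trivial | ring
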